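-- pv_equiv track=rewrite | github.com/tyagi-nishkarsh/Object-classification | object.py | read_objects
-- ===== SOURCE A (Python) =====
-- def read_objects(detection_objects):
--     """Generate natural text describing detected objects."""
--     object_counts = {}
--     for detection in detection_objects:
--         label = detection['label']
--         object_counts[label] = object_counts.get(label, 0) + 1
--
--     response = "This picture contains"
--     labels = list(object_counts.keys())
--     for i, label in enumerate(labels):
--         response += f" {object_counts[label]} {label}"
--         if object_counts[label] > 1:
--             response += "s"
--         if i < len(labels) - 2:
--             response += ","
--         elif i == len(labels) - 2:
--             response += " and"
--     response += "."
--     return response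
-- ===== SOURCE B (Python) =====
-- def read_objects(detection_objects):
--     """Generate natural text describing detected objects."""
--     labels = [detection['label'] for detection in detection_objects]
--     seen = []
--     for l in labels:
--         if l not in seen:
--             seen.append(l)
--
--     def piece(l):
--         c = labels.count(l)
--         return f"{c} {l}" + ("s" if c > 1 else "")
--
--     def assemble(ls):
--         if not ls:
--             return ""
--         if len(ls) == 1:
--             return " " + piece(ls[0])
--         if len(ls) == 2:
--             return " " + piece(ls[0]) + " and" + assemble(ls[1:])
--         return " " + piece(ls[0]) + "," + assemble(ls[1:])
--
--     return "This picture contains" + assemble(seen) + "."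
-- ===== Notes on version B (the rewrite author's own statement) =====
-- stated objective: alternative
-- what changed: Drops the counting dict entirely: B dedups the label list to first-occurrence order with a membership scan, computes each count on demand with labels.count, and builds the sentence by a recursive case split on the remaining labels (>=2 left: comma, exactly 2 left: ' and', last: nothing) instead of A's single enumerate loop comparing indices against len-1/len-2 over dict keys.
import Mathlib
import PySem

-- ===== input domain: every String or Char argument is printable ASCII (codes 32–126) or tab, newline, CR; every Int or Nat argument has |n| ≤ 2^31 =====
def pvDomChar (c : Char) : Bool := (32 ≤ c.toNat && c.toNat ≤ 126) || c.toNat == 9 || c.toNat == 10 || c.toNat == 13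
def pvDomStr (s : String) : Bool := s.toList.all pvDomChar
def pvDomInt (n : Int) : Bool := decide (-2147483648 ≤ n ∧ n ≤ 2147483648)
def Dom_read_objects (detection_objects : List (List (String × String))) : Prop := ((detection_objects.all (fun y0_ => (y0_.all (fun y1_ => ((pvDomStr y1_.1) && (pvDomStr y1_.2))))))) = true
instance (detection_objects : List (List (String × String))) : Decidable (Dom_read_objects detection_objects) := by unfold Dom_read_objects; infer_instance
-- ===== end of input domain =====

-- B replaces A's dict-counting + index-vs-length enumerate loop by a dedup-then-count-on-demand
-- recursive sentence assembly (objective: alternative algorithm, O(n*k) counts instead of a dict).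


-- shared helper: detection['label'] (first match in the association list; Pre_ guarantees the key is present)
def pvLabel (det : List (String × String)) : String := (List.lookup "label" det).getD ""

-- ===== PORT A =====
def read_objects (detection_objects : List (List (String × String))) : String :=
  let object_counts : PySem.Dict String Int :=
    detection_objects.foldl (fun oc det =>
      let label := pvLabel det
      oc.insert label (oc.getD label 0 + 1)) PySem.Dict.empty
  let labels := object_counts.keys
  let response :=
    (PySem.List.enumerate labels).foldl (fun response il =>
      let response := response ++ " " ++ PySem.Int.toStr (object_counts.getD il.2 0) ++ " " ++ il.2
      let response := if object_counts.getD il.2 0 > 1 then response ++ "s" else response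
      if il.1 < (labels.length : Int) - 2 then response ++ ","
      else if il.1 == (labels.length : Int) - 2 then response ++ " and"
      else response) "This picture contains"
  response ++ "."

-- ===== PORT B =====
-- piece(l): f"{c} {l}" + ("s" if c > 1 else ""), c = labels.count(l)
def pvPiece (labels : List String) (l : String) : String :=
  let c : Int := PySem.List.count labels l
  PySem.Int.toStr c ++ " " ++ l ++ (if c > 1 then "s" else "")

-- assemble(ls): recursive case split on how many labels remain
def pvAssemble (labels : List String) : List String → String
  | [] => ""
  | [l] => " " ++ pvPiece labels l
  | [l, m] => " " ++ pvPiece labels l ++ " and" ++ pvAssemble labels [m]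
  | l :: m :: k :: rest => " " ++ pvPiece labels l ++ "," ++ pvAssemble labels (m :: k :: rest)

def read_objects_alt (detection_objects : List (List (String × String))) : String :=
  let labels := detection_objects.map pvLabel
  let seen := PySem.Set.ofList labels   -- the membership-scan dedup loop, first occurrences in order
  "This picture contains" ++ pvAssemble labels seen ++ "."

-- ===== PRECONDITION & SPEC =====
-- Pre_ excludes exactly the detections without a 'label' key, on which Python A raises KeyError.
def Pre_read_objects (detection_objects : List (List (String × String))) : Prop :=
  (detection_objects.all (fun det => det.any (fun p => p.1 == "label"))) = true
instance (detection_objects : List (List (String × String))) : Decidable (Pre_read_objects detection_objects) := by unfold Pre_read_objects; infer_instance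
def pvWitness_read_objects : (List (List (String × String))) := [[("label", "cat")], [("label", "dog")], [("label", "cat")]]

def Spec_read_objects (detection_objects : List (List (String × String))) (out : String) : Prop := out = read_objects_alt detection_objects
instance (detection_objects : List (List (String × String))) (out : String) : Decidable (Spec_read_objects detection_objects out) := by unfold Spec_read_objects; infer_instance

-- ===== CLAIM =====
def Claim_equal_read_objects : Prop := ∀ (detection_objects : List (List (String × String))), Dom_read_objects detection_objects → Pre_read_objects detection_objects → Spec_read_objects detection_objects (read_objects detection_objects)

-- ===== LEMMAS AND PROOFS =====

-- A's enumerate loop (separators chosen from index vs n) equals B's recursive assembly,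
-- whenever the loop indices line up: i + (remaining length) = n.
theorem pv_fold_eq_assemble (labels : List String) (n : Int) :
    ∀ (xs : List String) (i : Int) (acc : String), i + xs.length = n →
      (PySem.List.enumerate xs i).foldl (fun r x =>
          let r1 := r ++ " " ++ PySem.Int.toStr (PySem.List.count labels x.2 : Int) ++ " " ++ x.2
          let r2 := if (PySem.List.count labels x.2 : Int) > 1 then r1 ++ "s" else r1
          if x.1 < n - 2 then r2 ++ ","
          else if x.1 == n - 2 then r2 ++ " and" else r2) acc
        = acc ++ pvAssemble labels xs := by
  intro xs
  induction xs with
  | nil => intro i acc _; simp [PySem.List.enumerate_nil, pvAssemble, String.append_empty]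
  | cons x rest ih =>
      intro i acc hi
      simp only [PySem.List.enumerate_cons, List.foldl_cons]
      rw [ih (i + 1) _ (by push_cast [List.length_cons, List.length_nil] at hi ⊢; omega)]
      match rest with
      | [] =>
          have h1 : ¬ i < n - 2 := by push_cast [List.length_cons, List.length_nil] at hi; omega
          have h2 : ¬ i = n - 2 := by push_cast [List.length_cons, List.length_nil] at hi; omega
          simp only [pvAssemble, pvPiece, beq_iff_eq, if_neg h1, if_neg h2]
          split_ifs <;> simp [String.append_assoc, String.append_empty]
      | [m] =>
          have h1 : ¬ i < n - 2 := by push_cast [List.length_cons, List.length_nil] at hi; omega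
          have h2 : i = n - 2 := by push_cast [List.length_cons, List.length_nil] at hi; omega
          simp only [pvAssemble, pvPiece, beq_iff_eq, if_neg h1, if_pos h2]
          split_ifs <;> simp [String.append_assoc, String.append_empty]
      | m :: k :: rest' =>
          have h1 : i < n - 2 := by push_cast [List.length_cons, List.length_nil] at hi; omega
          simp only [pvAssemble, pvPiece, if_pos h1]
          split_ifs <;> simp [String.append_assoc, String.append_empty]

-- ===== VERDICT =====
theorem read_objects_spec : Claim_equal_read_objects := by
  intro objs _ _
  unfold Spec_read_objects
  simp only [read_objects, read_objects_alt]
  have hc : objs.foldl (fun oc det => oc.insert (pvLabel det) (oc.getD (pvLabel det) 0 + 1))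
      PySem.Dict.empty = PySem.Dict.counter (objs.map pvLabel) := by
    rw [← PySem.Dict.foldl_insert_getD_add_one_eq_counter]
    exact (@List.foldl_map _ _ _ pvLabel
      (fun (d : PySem.Dict String Int) (x : String) => d.insert x (d.getD x 0 + 1))
      objs PySem.Dict.empty).symm
  rw [hc]
  simp only [PySem.Dict.getD_counter, PySem.Dict.keys_counter]
  have h := pv_fold_eq_assemble (objs.map pvLabel)
        ((PySem.Set.ofList (objs.map pvLabel)).length : Int)
        (PySem.Set.ofList (objs.map pvLabel)) 0 "This picture contains" (by simp)
  simp only [PySem.List.count_eq] at h ⊢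
  rw [h]
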